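-- pv_equiv track=rewrite | github.com/czei/themeparkhallofshame | backend/src/collector/metadata_collector.py | classify_indoor_outdoor
-- ===== SOURCE A (Python) =====
-- from typing import Dict, List, Optional, Tuple, Any
--
-- INDOOR_TAGS = {
--     'indoor',
--     'dark ride',
--     'dark-ride',
--     'indoor ride',
--     'indoor-ride',
--     'enclosed',
--     'air conditioned',
--     'covered',
-- }
--
-- OUTDOOR_TAGS = {
--     'outdoor',
--     'outdoor ride',
--     'outdoor-ride',
--     'coaster',
--     'roller coaster',
--     'water ride',
--     'log flume',
--     'rapids',
--     'boat ride',
-- }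
--
-- def classify_indoor_outdoor(tags: List[str]) -> Optional[str]:
--     """
--     Classify an entity as indoor/outdoor/hybrid based on tags.
--
--     Args:
--         tags: List of tag strings from the API
--
--     Returns:
--         'INDOOR', 'OUTDOOR', 'HYBRID', or None if unknown
--     """
--     if not tags:
--         return None
--
--     tags_lower = {t.lower() for t in tags}
--
--     has_indoor = bool(tags_lower & INDOOR_TAGS)
--     has_outdoor = bool(tags_lower & OUTDOOR_TAGS)
--
--     if has_indoor and has_outdoor:
--         return 'HYBRID'
--     elif has_indoor:
--         return 'INDOOR'
--     elif has_outdoor: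
--         return 'OUTDOOR'
--
--     return None
-- ===== SOURCE B (Python) =====
-- # Table-driven reimplementation: one tag->bit dictionary, a bitwise-OR
-- # accumulation, and a 4-entry result table indexed by the mask.
-- TAG_BITS = {
--     'indoor': 1,
--     'dark ride': 1,
--     'dark-ride': 1,
--     'indoor ride': 1,
--     'indoor-ride': 1,
--     'enclosed': 1,
--     'air conditioned': 1,
--     'covered': 1,
--     'outdoor': 2,
--     'outdoor ride': 2,
--     'outdoor-ride': 2,
--     'coaster': 2,
--     'roller coaster': 2,
--     'water ride': 2,
--     'log flume': 2,
--     'rapids': 2,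
--     'boat ride': 2,
-- }
--
-- RESULT = (None, 'INDOOR', 'OUTDOOR', 'HYBRID')
--
-- def classify_indoor_outdoor(tags):
--     if not tags:
--         return None
--     mask = 0
--     for t in tags:
--         mask |= TAG_BITS.get(t.lower(), 0)
--     return RESULT[mask]
-- ===== Notes on version B (the rewrite author's own statement) =====
-- stated objective: alternative
-- what changed: Replaces the lowered-tag set, the two set intersections and the four-way boolean branch by a table-driven scheme: a single tag-to-bit dictionary (indoor=1, outdoor=2), one bitwise-OR accumulation over the tags, and indexing a 4-entry result table with the final mask.
import Mathlib
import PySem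

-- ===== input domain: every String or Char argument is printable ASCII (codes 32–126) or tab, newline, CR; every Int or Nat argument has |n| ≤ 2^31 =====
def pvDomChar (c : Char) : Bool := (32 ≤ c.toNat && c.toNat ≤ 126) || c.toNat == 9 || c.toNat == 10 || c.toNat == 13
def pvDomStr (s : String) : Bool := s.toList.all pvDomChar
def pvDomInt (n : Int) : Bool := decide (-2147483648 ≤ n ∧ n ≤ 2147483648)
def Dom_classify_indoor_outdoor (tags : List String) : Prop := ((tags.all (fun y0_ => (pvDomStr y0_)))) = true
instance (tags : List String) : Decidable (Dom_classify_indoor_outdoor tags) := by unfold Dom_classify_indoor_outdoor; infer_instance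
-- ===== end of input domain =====

-- ===== PORT A =====
-- B replaces A's lowered-tag set and two set intersections by a table-driven scheme:
-- one tag->bit dictionary, a bitwise-OR accumulation, and a 4-entry result table (alternative).
def indoorTags : List String :=
  ["indoor", "dark ride", "dark-ride", "indoor ride", "indoor-ride",
   "enclosed", "air conditioned", "covered"]

def outdoorTags : List String :=
  ["outdoor", "outdoor ride", "outdoor-ride", "coaster", "roller coaster",
   "water ride", "log flume", "rapids", "boat ride"]

def classify_indoor_outdoor (tags : List String) : Option String :=
  if tags = [] then none
  else
    -- tags_lower = {t.lower() for t in tags}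
    let tagsLower : PySem.Set String := PySem.Set.ofList (tags.map PySem.Str.lower)
    -- bool(tags_lower & INDOOR_TAGS) / bool(tags_lower & OUTDOOR_TAGS)
    let hasIndoor : Bool := (PySem.Set.inter tagsLower indoorTags) ≠ []
    let hasOutdoor : Bool := (PySem.Set.inter tagsLower outdoorTags) ≠ []
    if hasIndoor && hasOutdoor then some "HYBRID"
    else if hasIndoor then some "INDOOR"
    else if hasOutdoor then some "OUTDOOR"
    else none

-- ===== PORT B =====
-- TAG_BITS : dict literal mapping each tag to its bit (indoor=1, outdoor=2)
def tagBits : PySem.Dict String Int := PySem.Dict.ofList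
  [("indoor", 1), ("dark ride", 1), ("dark-ride", 1), ("indoor ride", 1),
   ("indoor-ride", 1), ("enclosed", 1), ("air conditioned", 1), ("covered", 1),
   ("outdoor", 2), ("outdoor ride", 2), ("outdoor-ride", 2), ("coaster", 2),
   ("roller coaster", 2), ("water ride", 2), ("log flume", 2), ("rapids", 2),
   ("boat ride", 2)]

-- RESULT = (None, 'INDOOR', 'OUTDOOR', 'HYBRID')
def resultTable : List (Option String) := [none, some "INDOOR", some "OUTDOOR", some "HYBRID"]

def classify_indoor_outdoor_alt (tags : List String) : Option String :=
  if tags = [] then none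
  else
    -- mask |= TAG_BITS.get(t.lower(), 0)   (Python's int '|' is Int.lor)
    let mask : Int := tags.foldl (fun m t => Int.lor m (PySem.Dict.getD tagBits (PySem.Str.lower t) 0)) 0
    -- RESULT[mask]; mask ∈ {0,1,2,3} always, so the index is in range (.getD none never fires)
    (PySem.List.pyGet? resultTable mask).getD none

-- ===== PRECONDITION & SPEC =====
def Spec_classify_indoor_outdoor (tags : List String) (out : Option String) : Prop := out = classify_indoor_outdoor_alt tags
instance (tags : List String) (out : Option String) : Decidable (Spec_classify_indoor_outdoor tags out) := by unfold Spec_classify_indoor_outdoor; infer_instance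

-- ===== CLAIM (what is proved, stated in full; the proofs are below) =====
def Claim_equal_classify_indoor_outdoor : Prop := ∀ (tags : List String), Dom_classify_indoor_outdoor tags → Spec_classify_indoor_outdoor tags (classify_indoor_outdoor tags)

-- ===== LEMMAS AND PROOFS =====
-- the bit a single (lowered) tag contributes, characterised through the membership tests A uses
lemma getD_tagBits (s : String) :
    PySem.Dict.getD tagBits s 0 =
      if indoorTags.contains s then 1 else if outdoorTags.contains s then 2 else 0 := by
  by_cases h1 : s = "indoor"
  · subst h1; decide
  by_cases h2 : s = "dark ride"
  · subst h2; decide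
  by_cases h3 : s = "dark-ride"
  · subst h3; decide
  by_cases h4 : s = "indoor ride"
  · subst h4; decide
  by_cases h5 : s = "indoor-ride"
  · subst h5; decide
  by_cases h6 : s = "enclosed"
  · subst h6; decide
  by_cases h7 : s = "air conditioned"
  · subst h7; decide
  by_cases h8 : s = "covered"
  · subst h8; decide
  by_cases h9 : s = "outdoor"
  · subst h9; decide
  by_cases h10 : s = "outdoor ride"
  · subst h10; decide
  by_cases h11 : s = "outdoor-ride"
  · subst h11; decide
  by_cases h12 : s = "coaster"
  · subst h12; decide
  by_cases h13 : s = "roller coaster"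
  · subst h13; decide
  by_cases h14 : s = "water ride"
  · subst h14; decide
  by_cases h15 : s = "log flume"
  · subst h15; decide
  by_cases h16 : s = "rapids"
  · subst h16; decide
  by_cases h17 : s = "boat ride"
  · subst h17; decide
  simp only [PySem.Dict.getD, PySem.Dict.get?,
    show tagBits.items = [("indoor", 1), ("dark ride", 1), ("dark-ride", 1), ("indoor ride", 1), ("indoor-ride", 1), ("enclosed", 1), ("air conditioned", 1), ("covered", 1), ("outdoor", 2), ("outdoor ride", 2), ("outdoor-ride", 2), ("coaster", 2), ("roller coaster", 2), ("water ride", 2), ("log flume", 2), ("rapids", 2), ("boat ride", 2)] from rfl,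
    List.find?_cons,
    show ("indoor" == s) = false from beq_eq_false_iff_ne.mpr (Ne.symm h1),
    show ("dark ride" == s) = false from beq_eq_false_iff_ne.mpr (Ne.symm h2),
    show ("dark-ride" == s) = false from beq_eq_false_iff_ne.mpr (Ne.symm h3),
    show ("indoor ride" == s) = false from beq_eq_false_iff_ne.mpr (Ne.symm h4),
    show ("indoor-ride" == s) = false from beq_eq_false_iff_ne.mpr (Ne.symm h5),
    show ("enclosed" == s) = false from beq_eq_false_iff_ne.mpr (Ne.symm h6),
    show ("air conditioned" == s) = false from beq_eq_false_iff_ne.mpr (Ne.symm h7),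
    show ("covered" == s) = false from beq_eq_false_iff_ne.mpr (Ne.symm h8),
    show ("outdoor" == s) = false from beq_eq_false_iff_ne.mpr (Ne.symm h9),
    show ("outdoor ride" == s) = false from beq_eq_false_iff_ne.mpr (Ne.symm h10),
    show ("outdoor-ride" == s) = false from beq_eq_false_iff_ne.mpr (Ne.symm h11),
    show ("coaster" == s) = false from beq_eq_false_iff_ne.mpr (Ne.symm h12),
    show ("roller coaster" == s) = false from beq_eq_false_iff_ne.mpr (Ne.symm h13),
    show ("water ride" == s) = false from beq_eq_false_iff_ne.mpr (Ne.symm h14),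
    show ("log flume" == s) = false from beq_eq_false_iff_ne.mpr (Ne.symm h15),
    show ("rapids" == s) = false from beq_eq_false_iff_ne.mpr (Ne.symm h16),
    show ("boat ride" == s) = false from beq_eq_false_iff_ne.mpr (Ne.symm h17)]
  simp [indoorTags, outdoorTags, h1, h2, h3, h4, h5, h6, h7, h8, h9, h10, h11, h12, h13, h14, h15, h16, h17, List.find?]

-- no tag string is in both tag lists
lemma tags_disjoint (s : String) :
    indoorTags.contains s = true → outdoorTags.contains s = true → False := by
  intro h1 h2
  rw [List.contains_iff_mem] at h1 h2
  simp only [indoorTags, outdoorTags, List.mem_cons, List.not_mem_nil, or_false] at h1 h2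
  rcases h1 with rfl | rfl | rfl | rfl | rfl | rfl | rfl | rfl <;> simp_all

-- loop invariant: starting from any mask value in {0,1,2,3}, the fold ORs in exactly the
-- "some indoor tag present" bit and the "some outdoor tag present" bit
lemma loop_inv (tags : List String) (m : Int) (hm : m = 0 ∨ m = 1 ∨ m = 2 ∨ m = 3) :
    tags.foldl (fun m t => Int.lor m (PySem.Dict.getD tagBits (PySem.Str.lower t) 0)) m
      = Int.lor m
          (Int.lor (if tags.any (fun t => indoorTags.contains (PySem.Str.lower t)) then 1 else 0)
                   (if tags.any (fun t => outdoorTags.contains (PySem.Str.lower t)) then 2 else 0)) := by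
  induction tags generalizing m with
  | nil =>
      rcases hm with rfl | rfl | rfl | rfl <;> simp [List.foldl] <;> decide
  | cons t rest ih =>
      simp only [List.foldl, List.any_cons]
      have hb := getD_tagBits (PySem.Str.lower t)
      have hI := Bool.eq_false_or_eq_true (indoorTags.contains (PySem.Str.lower t))
      have hO := Bool.eq_false_or_eq_true (outdoorTags.contains (PySem.Str.lower t))
      rcases hI with hI | hI <;> rcases hO with hO | hO
      · exact absurd hO (by intro hO; exact tags_disjoint _ hI hO)
      · simp only [hI, hO, if_true, if_false, Bool.false_or, Bool.true_or, Bool.or_false, Bool.or_true] at hb ⊢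
        rw [hb]
        rcases hm with rfl | rfl | rfl | rfl <;>
          rw [ih _ (by decide)] <;>
          rcases hRI : rest.any (fun t => indoorTags.contains (PySem.Str.lower t)) <;>
            rcases hRO : rest.any (fun t => outdoorTags.contains (PySem.Str.lower t)) <;>
            decide
      · simp only [hI, hO, if_true, if_false, Bool.false_or, Bool.true_or, Bool.or_false, Bool.or_true] at hb ⊢
        rw [hb]
        rcases hm with rfl | rfl | rfl | rfl <;>
          rw [ih _ (by decide)] <;>
          rcases hRI : rest.any (fun t => indoorTags.contains (PySem.Str.lower t)) <;>
            rcases hRO : rest.any (fun t => outdoorTags.contains (PySem.Str.lower t)) <;>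
            decide
      · simp only [hI, hO, if_true, if_false, Bool.false_or, Bool.true_or, Bool.or_false, Bool.or_true] at hb ⊢
        rw [hb]
        rcases hm with rfl | rfl | rfl | rfl <;>
          rw [ih _ (by decide)] <;>
          rcases hRI : rest.any (fun t => indoorTags.contains (PySem.Str.lower t)) <;>
            rcases hRO : rest.any (fun t => outdoorTags.contains (PySem.Str.lower t)) <;>
            decide

lemma inter_ne_iff (tags ts : List String) :
    ((PySem.Set.inter (PySem.Set.ofList (tags.map PySem.Str.lower)) ts ≠ []) : Bool)
      = tags.any (fun t => ts.contains (PySem.Str.lower t)) := by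
  rcases h : tags.any (fun t => ts.contains (PySem.Str.lower t)) with _ | _
  · simp only [List.any_eq_false] at h
    simp only [decide_eq_false_iff_not, ne_eq, not_not]
    rw [List.eq_nil_iff_forall_not_mem]
    intro x hx
    rw [PySem.Set.mem_inter, PySem.Set.mem_ofList, List.mem_map] at hx
    obtain ⟨⟨t, ht, rfl⟩, hx2⟩ := hx
    have := h t ht
    simp only [List.contains_iff_mem] at this
    exact this hx2
  · simp only [List.any_eq_true] at h
    obtain ⟨t, ht, htc⟩ := h
    simp only [decide_eq_true_eq, ne_eq]
    intro hemp
    have hmem : PySem.Str.lower t ∈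
        PySem.Set.inter (PySem.Set.ofList (tags.map PySem.Str.lower)) ts := by
      rw [PySem.Set.mem_inter, PySem.Set.mem_ofList]
      exact ⟨List.mem_map_of_mem ht, by simpa [List.contains_iff_mem] using htc⟩
    rw [hemp] at hmem
    exact (List.not_mem_nil) hmem

-- ===== VERDICT (by name: the statement is the Claim_ definition above) =====
theorem classify_indoor_outdoor_spec : Claim_equal_classify_indoor_outdoor := by
  intro tags _
  unfold Spec_classify_indoor_outdoor classify_indoor_outdoor classify_indoor_outdoor_alt
  by_cases h : tags = []
  · simp [h]
  · simp only [h, if_false]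
    rw [loop_inv tags 0 (Or.inl rfl)]
    have hA := inter_ne_iff tags indoorTags
    have hB := inter_ne_iff tags outdoorTags
    rcases hI : tags.any (fun t => indoorTags.contains (PySem.Str.lower t)) <;>
      rcases hO : tags.any (fun t => outdoorTags.contains (PySem.Str.lower t)) <;>
        rw [hI] at hA <;> rw [hO] at hB <;>
        simp only [hA, hB] <;> decide
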